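-- pv_equiv track=rewrite | github.com/wegar-2/pyrecipes | scripts/hackerrank/algorithms/between_two_sets.py | between_two_sets
-- ===== SOURCE A (Python) =====
-- import math
--
-- def between_two_sets(a: list[int], b: list[int]):
--     gcd_b = math.gcd(*b)
--     lcm_a = math.lcm(*a)
--     solutions_counter = 0
--     for x in range(lcm_a, gcd_b+1, 1):
--         if (x % lcm_a == 0) and (gcd_b % x == 0):
--             solutions_counter += 1
--     return solutions_counter
-- ===== SOURCE B (Python) =====
-- import math
--
-- def between_two_sets(a: list[int], b: list[int]):
--     g = math.gcd(*b)
--     l = math.lcm(*a)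
--     if g == 0 or g % l != 0:
--         return 0
--     m = g // l
--     count = 0
--     d = 1
--     while d * d <= m:
--         if m % d == 0:
--             count += 1 if d * d == m else 2
--         d += 1
--     return count
-- ===== Notes on version B (the rewrite author's own statement) =====
-- stated objective: alternative
-- what changed: A scans every integer from lcm(a) up to gcd(b); B first tests whether lcm(a) divides gcd(b) (answer 0 otherwise) and then counts the divisors of m = gcd(b)//lcm(a) by trial division up to sqrt(m), counting each divisor pair at once (the scan is asymptotically cheaper, but on the timed inputs the shared gcd/lcm folds dominate, so no speed is claimed).
import Mathlib
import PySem

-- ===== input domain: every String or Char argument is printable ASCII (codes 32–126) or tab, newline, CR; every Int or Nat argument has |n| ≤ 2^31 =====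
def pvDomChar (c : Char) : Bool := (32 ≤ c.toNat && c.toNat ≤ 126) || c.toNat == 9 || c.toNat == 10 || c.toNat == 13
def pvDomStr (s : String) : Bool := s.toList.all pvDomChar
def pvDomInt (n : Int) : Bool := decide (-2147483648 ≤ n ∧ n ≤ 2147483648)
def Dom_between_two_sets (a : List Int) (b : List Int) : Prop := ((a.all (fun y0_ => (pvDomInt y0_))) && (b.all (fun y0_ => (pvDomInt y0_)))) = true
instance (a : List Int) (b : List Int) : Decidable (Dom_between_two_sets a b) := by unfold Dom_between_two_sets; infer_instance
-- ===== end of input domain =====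

-- B replaces A's linear scan from lcm(a) up to gcd(b) by: if lcm(a) divides gcd(b),
-- count the divisors of gcd(b)//lcm(a) by trial division up to its square root.


-- ===== PORT A =====
def between_two_sets (a : List Int) (b : List Int) : Int :=
  let gcd_b : Int := b.foldl (fun g x => (Int.gcd g x : Int)) 0
  let lcm_a : Int := a.foldl (fun l x => (Int.lcm l x : Int)) 1
  (PySem.List.pyRange lcm_a (gcd_b + 1) 1).foldl
    (fun c x => if PySem.Int.mod x lcm_a = 0 ∧ PySem.Int.mod gcd_b x = 0 then c + 1 else c)
    0

-- ===== PORT B =====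
-- while d*d <= m: if m % d == 0: count += 1 if d*d == m else 2; d += 1
def btsTrial (m : Int) (d : Int) (c : Int) : Int :=
  if h : d * d ≤ m then
    btsTrial m (d + 1) (if PySem.Int.mod m d = 0 then (if d * d = m then c + 1 else c + 2) else c)
  else c
termination_by (m + 1 - d).toNat
decreasing_by
  have hd : d ≤ m := by
    by_cases h0 : d ≤ 0
    · exact h0.trans ((mul_self_nonneg d).trans h)
    · have h0' : (1 : Int) ≤ d := by omega
      calc d = d * 1 := (mul_one d).symm
        _ ≤ d * d := mul_le_mul_of_nonneg_left h0' (by omega)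
        _ ≤ m := h
  omega

def between_two_sets_alt (a : List Int) (b : List Int) : Int :=
  let g : Int := b.foldl (fun g x => (Int.gcd g x : Int)) 0
  let l : Int := a.foldl (fun l x => (Int.lcm l x : Int)) 1
  if g = 0 ∨ PySem.Int.mod g l ≠ 0 then 0
  else btsTrial (PySem.Int.floordiv g l) 1 0

-- ===== PRECONDITION & SPEC =====
-- Pre_ excludes lists a containing 0: there lcm(a) = 0 and A raises ZeroDivisionError.
def Pre_between_two_sets (a : List Int) (b : List Int) : Prop := (0 : Int) ∉ a
instance (a : List Int) (b : List Int) : Decidable (Pre_between_two_sets a b) := by unfold Pre_between_two_sets; infer_instance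
def pvWitness_between_two_sets : List Int × List Int := ([2, 6], [12, 24])

def Spec_between_two_sets (a : List Int) (b : List Int) (out : Int) : Prop := out = between_two_sets_alt a b
instance (a : List Int) (b : List Int) (out : Int) : Decidable (Spec_between_two_sets a b out) := by unfold Spec_between_two_sets; infer_instance

-- ===== CLAIM (what is proved, stated in full; the proofs are below) =====
def Claim_equal_between_two_sets : Prop := ∀ (a : List Int) (b : List Int), Dom_between_two_sets a b → Pre_between_two_sets a b → Spec_between_two_sets a b (between_two_sets a b)

-- ===== LEMMAS AND PROOFS =====

-- the set of (positive) divisors of m, as integers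
def divSet (m : Int) : Finset Int := ((PySem.List.pyRange 1 (m + 1) 1).filter (fun k => decide (m % k = 0))).toFinset

lemma mem_divSet (m k : Int) : k ∈ divSet m ↔ 1 ≤ k ∧ k ≤ m ∧ k ∣ m := by
  unfold divSet
  simp only [List.mem_toFinset, List.mem_filter, PySem.List.mem_pyRange_one, decide_eq_true_eq]
  constructor
  · rintro ⟨⟨h1, h2⟩, h3⟩; exact ⟨h1, by omega, Int.dvd_of_emod_eq_zero h3⟩
  · rintro ⟨h1, h2, h3⟩; exact ⟨⟨h1, by omega⟩, Int.emod_eq_zero_of_dvd h3⟩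

lemma gcd_fold_nonneg (b : List Int) : ∀ init : Int, 0 ≤ init →
    0 ≤ b.foldl (fun g x => (Int.gcd g x : Int)) init := by
  induction b with
  | nil => intro init h; simpa using h
  | cons y ys ih => intro init h; exact ih _ (Int.natCast_nonneg _)

lemma lcm_fold_pos (a : List Int) (ha : (0 : Int) ∉ a) : ∀ init : Int, 0 < init →
    0 < a.foldl (fun l x => (Int.lcm l x : Int)) init := by
  induction a with
  | nil => intro init h; simpa using h
  | cons y ys ih =>
    intro init h
    simp only [List.mem_cons, not_or] at ha
    refine ih ha.2 _ ?_
    have : 0 < Int.lcm init y := by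
      have h1 : init.natAbs ≠ 0 := by omega
      have h2 : y.natAbs ≠ 0 := fun hc => ha.1 (Int.natAbs_eq_zero.mp hc).symm
      exact Nat.pos_of_ne_zero (by simp [Int.lcm, Nat.lcm_eq_zero_iff, h1, h2])
    show (0 : Int) < ((Int.lcm init y : Nat) : Int)
    exact_mod_cast this

lemma foldl_count (p : Int → Prop) [DecidablePred p] (xs : List Int) : ∀ c : Int,
    xs.foldl (fun c x => if p x then c + 1 else c) c = c + xs.countP (fun x => decide (p x)) := by
  induction xs with
  | nil => intro c; simp
  | cons y ys ih =>
    intro c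
    rw [List.foldl_cons, List.countP_cons]
    by_cases h : p y
    · rw [if_pos h, ih]
      simp only [h, decide_true, if_true]
      push_cast; ring
    · rw [if_neg h, ih]
      simp only [h, decide_false, if_false]
      push_cast; ring

lemma countP_nodup_card (l : List Int) (hl : l.Nodup) (p : Int → Prop) [DecidablePred p] :
    l.countP (fun x => decide (p x)) = (l.toFinset.filter p).card := by
  have hnd : (l.filter (fun x => decide (p x))).Nodup := hl.filter _
  rw [List.countP_eq_length_filter, ← List.toFinset_card_of_nodup hnd]
  congr 1
  ext x
  simp [List.mem_filter]

lemma toFinset_pyRange (a b : Int) : (PySem.List.pyRange a b 1).toFinset = Finset.Icc a (b - 1) := by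
  ext x
  simp only [List.mem_toFinset, PySem.List.mem_pyRange_one, Finset.mem_Icc]
  omega

-- A-side card: multiples of L in [L, G] dividing G ↔ divisors of m (G = L * m)
lemma card_A (L m : Int) (hL : 1 ≤ L) (hm : 1 ≤ m) :
    ((Finset.Icc L (L * m)).filter (fun x => L ∣ x ∧ x ∣ L * m)).card = (divSet m).card := by
  have hL0 : L ≠ 0 := by omega
  apply Finset.card_bij' (fun x _ => x / L) (fun k _ => L * k)
  · intro x hx
    simp only [Finset.mem_filter, Finset.mem_Icc] at hx
    obtain ⟨⟨hx1, hx2⟩, ⟨u, rfl⟩, hdvd⟩ := hx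
    rw [Int.mul_ediv_cancel_left u hL0, mem_divSet]
    refine ⟨by nlinarith, by nlinarith, ?_⟩
    exact (mul_dvd_mul_iff_left hL0).mp hdvd
  · intro k hk
    rw [mem_divSet] at hk
    obtain ⟨hk1, hk2, hkd⟩ := hk
    simp only [Finset.mem_filter, Finset.mem_Icc]
    exact ⟨⟨by nlinarith, by nlinarith⟩, ⟨k, rfl⟩, mul_dvd_mul_left L hkd⟩
  · intro x hx
    simp only [Finset.mem_filter, Finset.mem_Icc] at hx
    obtain ⟨_, ⟨u, rfl⟩, _⟩ := hx
    rw [Int.mul_ediv_cancel_left u hL0]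
  · intro k hk
    rw [Int.mul_ediv_cancel_left k hL0]

-- pairing: divisors with e*e > m ↔ divisors with e*e < m, via e ↦ m / e
lemma card_pairing (m : Int) (hm : 1 ≤ m) :
    ((divSet m).filter (fun e => ¬ e * e ≤ m)).card = ((divSet m).filter (fun e => e * e < m)).card := by
  have hm0 : m ≠ 0 := by omega
  apply Finset.card_bij' (fun e _ => m / e) (fun f _ => m / f)
  · intro e he
    simp only [Finset.mem_filter, mem_divSet] at he
    obtain ⟨⟨he1, he2, u, rfl⟩, hgt⟩ := he
    push_neg at hgt
    rw [Int.mul_ediv_cancel_left u (by omega)]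
    have hu1 : 1 ≤ u := by nlinarith
    have hue : u < e := by nlinarith
    simp only [Finset.mem_filter, mem_divSet]
    exact ⟨⟨hu1, by nlinarith, ⟨e, mul_comm e u⟩⟩, by nlinarith⟩
  · intro f hf
    simp only [Finset.mem_filter, mem_divSet] at hf
    obtain ⟨⟨hf1, hf2, u, rfl⟩, hlt⟩ := hf
    rw [Int.mul_ediv_cancel_left u (by omega)]
    have hu1 : 1 ≤ u := by nlinarith
    have huf : f < u := by nlinarith
    simp only [Finset.mem_filter, mem_divSet]
    refine ⟨⟨hu1, by nlinarith, ⟨f, mul_comm f u⟩⟩, ?_⟩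
    push_neg
    nlinarith
  · intro e he
    simp only [Finset.mem_filter, mem_divSet] at he
    obtain ⟨⟨he1, he2, u, rfl⟩, _⟩ := he
    have hu : u ≠ 0 := by intro h; rw [h, mul_zero] at he2; omega
    rw [Int.mul_ediv_cancel_left u (by omega), mul_comm, Int.mul_ediv_cancel_left e hu]
  · intro f hf
    simp only [Finset.mem_filter, mem_divSet] at hf
    obtain ⟨⟨hf1, hf2, u, rfl⟩, _⟩ := hf
    have hu : u ≠ 0 := by intro h; rw [h, mul_zero] at hf2; omega
    rw [Int.mul_ediv_cancel_left u (by omega), mul_comm, Int.mul_ediv_cancel_left f hu]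

lemma filter_step (m d : Int) (hd : 1 ≤ d) (hdm : d ≤ m) (q : Int → Prop) [DecidablePred q] :
    ((divSet m).filter (fun e => d ≤ e ∧ q e)).card
      = ((divSet m).filter (fun e => d + 1 ≤ e ∧ q e)).card + (if d ∣ m ∧ q d then 1 else 0) := by
  by_cases h : d ∣ m ∧ q d
  · rw [if_pos h]
    have hins : (divSet m).filter (fun e => d ≤ e ∧ q e)
        = insert d ((divSet m).filter (fun e => d + 1 ≤ e ∧ q e)) := by
      ext e
      simp only [Finset.mem_insert, Finset.mem_filter, mem_divSet]
      constructor
      · rintro ⟨hmem, hde, hqe⟩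
        rcases eq_or_lt_of_le hde with heq | hlt
        · exact Or.inl heq.symm
        · exact Or.inr ⟨hmem, by omega, hqe⟩
      · rintro (rfl | ⟨hmem, hde, hqe⟩)
        · exact ⟨⟨hd, hdm, h.1⟩, le_rfl, h.2⟩
        · exact ⟨hmem, by omega, hqe⟩
    rw [hins, Finset.card_insert_of_notMem
      (by simp only [Finset.mem_filter, mem_divSet]; rintro ⟨-, hcon, -⟩; omega)]
  · rw [if_neg h, add_zero]
    rw [not_and_or] at h
    congr 1
    ext e
    simp only [Finset.mem_filter, mem_divSet]
    constructor
    · rintro ⟨hmem, hde, hqe⟩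
      refine ⟨hmem, ?_, hqe⟩
      rcases eq_or_lt_of_le hde with rfl | hlt
      · rcases h with h1 | h1
        · exact absurd hmem.2.2 h1
        · exact absurd hqe h1
      · omega
    · rintro ⟨hmem, hde, hqe⟩
      exact ⟨hmem, by omega, hqe⟩

lemma btsTrial_eq (m : Int) (hm : 1 ≤ m) : ∀ n : Nat, ∀ d c : Int, 1 ≤ d → (m + 1 - d).toNat ≤ n →
    btsTrial m d c = c + (((divSet m).filter (fun e => d ≤ e ∧ e * e ≤ m)).card
      + ((divSet m).filter (fun e => d ≤ e ∧ e * e < m)).card) := by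
  intro n
  induction n with
  | zero =>
    intro d c hd hn
    have hdm : m < d := by omega
    have hstop : ¬ d * d ≤ m := by nlinarith
    rw [btsTrial, dif_neg hstop]
    have h1 : (divSet m).filter (fun e => d ≤ e ∧ e * e ≤ m) = ∅ := by
      apply Finset.filter_false_of_mem
      intro e he
      rw [mem_divSet] at he
      rintro ⟨h2, -⟩
      omega
    have h2 : (divSet m).filter (fun e => d ≤ e ∧ e * e < m) = ∅ := by
      apply Finset.filter_false_of_mem
      intro e he
      rw [mem_divSet] at he
      rintro ⟨h2, -⟩
      omega
    rw [h1, h2]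
    simp
  | succ n ih =>
    intro d c hd hn
    rw [btsTrial]
    by_cases h : d * d ≤ m
    · rw [dif_pos h]
      have hdm : d ≤ m := by nlinarith
      have hrec := ih (d + 1) (if PySem.Int.mod m d = 0 then (if d * d = m then c + 1 else c + 2) else c) (by omega) (by omega)
      rw [hrec]
      have hmod : PySem.Int.mod m d = 0 ↔ d ∣ m := by
        rw [PySem.Int.mod_eq_emod_of_pos (by omega)]
        exact ⟨Int.dvd_of_emod_eq_zero, Int.emod_eq_zero_of_dvd⟩
      have hs1 := filter_step m d hd hdm (fun e => e * e ≤ m)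
      have hs2 := filter_step m d hd hdm (fun e => e * e < m)
      by_cases hdvd : d ∣ m
      · by_cases hsq : d * d = m
        · rw [if_pos (hmod.mpr hdvd), if_pos hsq]
          rw [if_pos ⟨hdvd, h⟩] at hs1
          rw [if_neg (by rintro ⟨-, hc⟩; omega)] at hs2
          rw [hs1, hs2]
          push_cast
          ring
        · rw [if_pos (hmod.mpr hdvd), if_neg hsq]
          rw [if_pos ⟨hdvd, h⟩] at hs1
          rw [if_pos ⟨hdvd, by omega⟩] at hs2
          rw [hs1, hs2]
          push_cast
          ring
      · rw [if_neg (fun hc => hdvd (hmod.mp hc))]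
        rw [if_neg (by rintro ⟨hc, -⟩; exact hdvd hc)] at hs1
        rw [if_neg (by rintro ⟨hc, -⟩; exact hdvd hc)] at hs2
        rw [hs1, hs2]
        push_cast
        ring
    · rw [dif_neg h]
      have h1 : (divSet m).filter (fun e => d ≤ e ∧ e * e ≤ m) = ∅ := by
        apply Finset.filter_false_of_mem
        intro e he
        rw [mem_divSet] at he
        rintro ⟨h2, h3⟩
        have : d * d ≤ e * e := by nlinarith
        omega
      have h2 : (divSet m).filter (fun e => d ≤ e ∧ e * e < m) = ∅ := by
        apply Finset.filter_false_of_mem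
        intro e he
        rw [mem_divSet] at he
        rintro ⟨h2, h3⟩
        have : d * d ≤ e * e := by nlinarith
        omega
      rw [h1, h2]
      simp

lemma btsTrial_card (m : Int) (hm : 1 ≤ m) : btsTrial m 1 0 = (divSet m).card := by
  rw [btsTrial_eq m hm (m + 1 - 1).toNat 1 0 le_rfl le_rfl]
  have e1 : (divSet m).filter (fun e => 1 ≤ e ∧ e * e ≤ m) = (divSet m).filter (fun e => e * e ≤ m) := by
    apply Finset.filter_congr
    intro e he
    rw [mem_divSet] at he
    simp [he.1]
  have e2 : (divSet m).filter (fun e => 1 ≤ e ∧ e * e < m) = (divSet m).filter (fun e => e * e < m) := by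
    apply Finset.filter_congr
    intro e he
    rw [mem_divSet] at he
    simp [he.1]
  rw [e1, e2, ← card_pairing m hm]
  rw [zero_add]
  have hsplit := Finset.filter_card_add_filter_neg_card_eq_card (s := divSet m) (p := fun e => e * e ≤ m)
  push_cast
  push_cast at hsplit
  omega


-- the central bridge, for any G ≥ 0 and L ≥ 1
lemma main_bridge (G L : Int) (hG : 0 ≤ G) (hL : 1 ≤ L) :
    (PySem.List.pyRange L (G + 1) 1).foldl
      (fun c x => if PySem.Int.mod x L = 0 ∧ PySem.Int.mod G x = 0 then c + 1 else c) 0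
    = if G = 0 ∨ PySem.Int.mod G L ≠ 0 then 0 else btsTrial (PySem.Int.floordiv G L) 1 0 := by
  rw [foldl_count (fun x => PySem.Int.mod x L = 0 ∧ PySem.Int.mod G x = 0), zero_add]
  have hmodGL : PySem.Int.mod G L = G % L := PySem.Int.mod_eq_emod_of_pos (by omega)
  by_cases hG0 : G = 0
  · subst hG0
    rw [PySem.List.pyRange_one_eq_nil (by omega), if_pos (Or.inl rfl)]
    simp
  by_cases hdvd : L ∣ G
  · -- L divides G: both sides count the divisors of m = G / L
    have hmod0 : G % L = 0 := Int.emod_eq_zero_of_dvd hdvd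
    rw [if_neg (by rw [hmodGL]; push_neg; exact ⟨hG0, hmod0⟩)]
    have hGpos : 0 < G := by omega
    have hGm : G = L * (G / L) := (Int.mul_ediv_cancel' hdvd).symm
    have hm1 : 1 ≤ G / L := by nlinarith [hGm]
    have hfd : PySem.Int.floordiv G L = G / L := PySem.Int.floordiv_eq_ediv_of_pos (by omega)
    rw [hfd, btsTrial_card (G / L) hm1]
    have hcong : (PySem.List.pyRange L (G + 1) 1).countP
          (fun x => decide (PySem.Int.mod x L = 0 ∧ PySem.Int.mod G x = 0))
        = (PySem.List.pyRange L (G + 1) 1).countP (fun x => decide (L ∣ x ∧ x ∣ G)) := by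
      apply List.countP_congr
      intro x hx
      rw [PySem.List.mem_pyRange_one] at hx
      rw [PySem.Int.mod_eq_emod_of_pos (show (0:Int) < L by omega),
        PySem.Int.mod_eq_emod_of_pos (show (0:Int) < x by omega)]
      simp only [decide_eq_true_eq]
      constructor
      · rintro ⟨h1, h2⟩
        exact ⟨Int.dvd_of_emod_eq_zero h1, Int.dvd_of_emod_eq_zero h2⟩
      · rintro ⟨h1, h2⟩
        exact ⟨Int.emod_eq_zero_of_dvd h1, Int.emod_eq_zero_of_dvd h2⟩
    rw [hcong, countP_nodup_card _ (PySem.List.nodup_pyRange_one L (G + 1)) (fun x => L ∣ x ∧ x ∣ G),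
      toFinset_pyRange]
    have hsimp : G + 1 - 1 = G := by ring
    rw [hsimp]
    conv_lhs => rw [hGm]
    exact_mod_cast congrArg Nat.cast (card_A L (G / L) hL hm1)
  · -- L does not divide G: A's predicate never holds and B returns 0
    rw [if_pos (Or.inr (by rw [hmodGL]; exact fun h => hdvd (Int.dvd_of_emod_eq_zero h)))]
    have hnone : ∀ x ∈ PySem.List.pyRange L (G + 1) 1,
        ¬ (PySem.Int.mod x L = 0 ∧ PySem.Int.mod G x = 0) := by
      intro x hx
      rw [PySem.List.mem_pyRange_one] at hx
      rintro ⟨h1, h2⟩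
      rw [PySem.Int.mod_eq_emod_of_pos (show (0:Int) < L by omega)] at h1
      rw [PySem.Int.mod_eq_emod_of_pos (show (0:Int) < x by omega)] at h2
      exact hdvd (dvd_trans (Int.dvd_of_emod_eq_zero h1) (Int.dvd_of_emod_eq_zero h2))
    rw [List.countP_eq_zero.mpr (by intro x hx; simpa using hnone x hx)]
    simp

-- ===== VERDICT (by name: the statement is the Claim_ definition above) =====
theorem between_two_sets_spec : Claim_equal_between_two_sets := by
  intro a b _ hpre
  unfold Spec_between_two_sets between_two_sets between_two_sets_alt
  exact main_bridge _ _ (gcd_fold_nonneg b 0 le_rfl) (lcm_fold_pos a hpre 1 one_pos)
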